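-- pv_equiv track=rewrite | github.com/Henry839/Negotiation | colored_trail/policy/random_policy.py | generate_choices
-- ===== SOURCE A (Python) =====
-- def generate_choices(chips):
--     """
--     Generate all possible combinations for an agent's chips
--     Args:
--         chip: an agent's chips
--         eg: [1,1,2,0]
--     Returns:
--         ans: All possible combinations for an agent's chip
--         eg:[[0, 0, 1, 0], [0, 0, 2, 0], [0, 1, 0, 0], [0, 1, 1, 0], [0, 1, 2, 0], [1, 0, 0, 0],
--         [1, 0, 1, 0], [1, 0, 2, 0], [1, 1, 0, 0], [1, 1, 1, 0], [1, 1, 2, 0]]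
--     """
--     def gen(cnts, idx=0, choice=[]):
--         if idx >= len(cnts):
--             if choice == [0,0,0,0] or choice == [1,1,1,1]:
--                 return None
--             return choice
--         choices = []
--         for c in range(cnts[idx] + 1):
--             choice.append(c)
--             tmp = gen(cnts, idx + 1, choice)
--             if tmp != None:
--                  choices += tmp
--             choice.pop()
--         return choices
--     choices = gen(chips)
--     ans = []
--     for i in range(0, len(choices), 4):
--         ans.append(choices[i:i + 4])
--     return ans
-- ===== SOURCE B (Python) =====
-- def generate_choices(chips):
--     n = len(chips)
--     if any(c < 0 for c in chips):
--         return []  # empty Cartesian product: some range(c+1) is empty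
--     flat = []
--     cur = [0] * n
--     while True:
--         if cur != [0, 0, 0, 0] and cur != [1, 1, 1, 1]:
--             flat.extend(cur)
--         # odometer increment, rightmost digit first
--         i = n - 1
--         while i >= 0 and cur[i] == chips[i]:
--             cur[i] = 0
--             i -= 1
--         if i < 0:
--             break
--         cur[i] += 1
--     return [flat[i:i + 4] for i in range(0, len(flat), 4)]
-- ===== Notes on version B (the rewrite author's own statement) =====
-- stated objective: alternative
-- what changed: Replaces the recursive backtracking generator (mutable choice list, append/pop) with an iterative odometer: a counter array incremented right-to-left in a while loop, emitting each combination in the same lexicographic order into one flat list that is then chunked by 4.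
import Mathlib
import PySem

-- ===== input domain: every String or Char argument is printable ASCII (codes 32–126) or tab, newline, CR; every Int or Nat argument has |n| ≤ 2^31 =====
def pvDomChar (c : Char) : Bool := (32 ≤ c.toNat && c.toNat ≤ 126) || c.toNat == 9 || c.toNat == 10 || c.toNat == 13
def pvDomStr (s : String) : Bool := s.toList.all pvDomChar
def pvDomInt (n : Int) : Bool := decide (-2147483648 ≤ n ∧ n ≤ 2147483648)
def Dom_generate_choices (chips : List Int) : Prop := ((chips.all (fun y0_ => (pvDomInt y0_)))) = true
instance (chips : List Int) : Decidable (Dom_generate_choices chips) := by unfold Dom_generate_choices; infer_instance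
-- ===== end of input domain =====

-- B replaces A's recursive backtracking generator by an iterative odometer loop (alternative decomposition, same cost).

-- ===== PORT A =====
-- inner recursive generator `gen`; returning [] models Python's `None` leaf exactly (both contribute nothing via `choices += tmp`)
def genA (cnts : List Int) (idx : Nat) (choice : List Int) : List Int :=
  if idx ≥ cnts.length then
    if choice = [0, 0, 0, 0] ∨ choice = [1, 1, 1, 1] then [] else choice
  else
    -- cnts[idx]: idx is in range in this branch, so getD is exact
    (PySem.List.pyRange 0 (cnts.getD idx 0 + 1) 1).foldl
      (fun acc c => acc ++ genA cnts (idx + 1) (choice ++ [c])) []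
termination_by cnts.length - idx
decreasing_by omega

def generate_choices (chips : List Int) : List (List Int) :=
  let choices := genA chips 0 []
  (PySem.List.pyRange 0 (choices.length : Int) 4).foldl
    (fun ans i => ans ++ [PySem.List.slice choices (some i) (some (i + 4))]) []

-- ===== PORT B =====
def zerosB (l : List Int) : List Int := l.map (fun _ => 0)

-- odometer increment: Source B's right-to-left carry scan (`while i >= 0 and cur[i] == chips[i]: cur[i] = 0; i -= 1`),
-- as structural recursion carrying the overflow up from the tail; `none` = the whole counter overflowed (loop break)
def incrB : List Int → List Int → Option (List Int)
  | [], [] => none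
  | c :: cs, x :: xs =>
      match incrB cs xs with
      | some xs' => some (x :: xs')
      | none => if x = c then none else some ((x + 1) :: zerosB cs)
  | _, _ => none  -- unreachable: chips and cur always have equal length

-- Source B's `while True` loop; fuel (= number of counter values) bounds the iteration count
def loopB (chips : List Int) (fuel : Nat) (cur flat : List Int) : List Int :=
  match fuel with
  | 0 => flat
  | f + 1 =>
    let flat' := if cur ≠ [0, 0, 0, 0] ∧ cur ≠ [1, 1, 1, 1] then flat ++ cur else flat
    match incrB chips cur with
    | none => flat'
    | some cur' => loopB chips f cur' flat'

def generate_choices_alt (chips : List Int) : List (List Int) :=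
  if chips.any (fun c => decide (c < 0)) then []
  else
    let fuel := (chips.map (fun c => (c + 1).toNat)).prod
    let flat := loopB chips fuel (zerosB chips) []
    (PySem.List.pyRange 0 (flat.length : Int) 4).foldl
      (fun ans i => ans ++ [PySem.List.slice flat (some i) (some (i + 4))]) []

-- ===== PRECONDITION & SPEC =====
def Spec_generate_choices (chips : List Int) (out : List (List Int)) : Prop := out = generate_choices_alt chips
instance (chips : List Int) (out : List (List Int)) : Decidable (Spec_generate_choices chips out) := by unfold Spec_generate_choices; infer_instance

-- ===== CLAIM (what is proved, stated in full; the proofs are below) =====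
def Claim_equal_generate_choices : Prop := ∀ (chips : List Int), Dom_generate_choices chips → Spec_generate_choices chips (generate_choices chips)

-- ===== LEMMAS AND PROOFS =====

-- the lexicographic product list both programs enumerate
def combos : List Int → List (List Int)
  | [] => [[]]
  | c :: cs => (PySem.List.pyRange 0 (c + 1) 1).flatMap (fun x => (combos cs).map (x :: ·))

def okC (l : List Int) : Bool := decide (l ≠ [0, 0, 0, 0] ∧ l ≠ [1, 1, 1, 1])

-- suffix of `combos chips` starting at counter value `cur`
def tailC : List Int → List Int → List (List Int)
  | [], [] => [[]]
  | c :: cs, x :: xs =>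
      ((tailC cs xs).map (x :: ·)) ++
        (PySem.List.pyRange (x + 1) (c + 1) 1).flatMap (fun y => (combos cs).map (y :: ·))
  | _, _ => []

-- `cur` is a componentwise-bounded counter for `chips`
def validC (chips cur : List Int) : Prop := List.Forall₂ (fun c x => 0 ≤ x ∧ x ≤ c) chips cur

theorem combos_neg {chips : List Int} (h : ∃ c ∈ chips, c < 0) : combos chips = [] := by
  induction chips with
  | nil => simp at h
  | cons c cs ih =>
    rcases h with ⟨d, hd, hdneg⟩
    rcases List.mem_cons.mp hd with rfl | hmem
    · simp [combos, PySem.List.pyRange_one_eq_nil (by omega : d + 1 ≤ 0)]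
    · simp [combos, ih ⟨d, hmem, hdneg⟩]

theorem tail_zeros {chips : List Int} (h : ∀ c ∈ chips, 0 ≤ c) :
    tailC chips (zerosB chips) = combos chips := by
  induction chips with
  | nil => simp [zerosB, tailC, combos]
  | cons c cs ih =>
    have hc : (0 : Int) < c + 1 := by have := h c (by simp); omega
    simp only [zerosB, List.map_cons, tailC, combos,
      PySem.List.pyRange_one_cons hc, List.flatMap_cons]
    have hih := ih (fun d hd => h d (by simp [hd]))
    simp only [zerosB] at hih
    rw [hih]

theorem valid_zeros {chips : List Int} (h : ∀ c ∈ chips, 0 ≤ c) :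
    validC chips (zerosB chips) := by
  induction chips with
  | nil => exact List.Forall₂.nil
  | cons c cs ih =>
    exact List.Forall₂.cons ⟨le_refl 0, h c (by simp)⟩ (ih (fun d hd => h d (by simp [hd])))

theorem valid_nonneg {chips cur : List Int} (h : validC chips cur) : ∀ c ∈ chips, 0 ≤ c := by
  induction h with
  | nil => simp
  | cons hcx _ ih =>
    intro d hd
    rcases List.mem_cons.mp hd with rfl | hmem
    · omega
    · exact ih d hmem

theorem incr_valid {chips cur cur' : List Int} (h : validC chips cur)
    (h2 : incrB chips cur = some cur') : validC chips cur' := by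
  induction h generalizing cur' with
  | nil => simp [incrB] at h2
  | @cons c x cs xs hcx htl ih =>
    simp only [incrB] at h2
    cases hi : incrB cs xs with
    | some xs' =>
      rw [hi] at h2
      cases h2
      exact List.Forall₂.cons hcx (ih hi)
    | none =>
      rw [hi] at h2
      by_cases hxc : x = c
      · simp [hxc] at h2
      · simp only [if_neg hxc] at h2
        cases h2
        refine List.Forall₂.cons ⟨by omega, by omega⟩ ?_
        exact valid_zeros (valid_nonneg htl)

-- the odometer step moves `tailC` forward by exactly one element
theorem tail_step {chips cur : List Int} (h : validC chips cur) :
    tailC chips cur = cur :: (match incrB chips cur with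
      | none => []
      | some cur' => tailC chips cur') := by
  induction h with
  | nil => simp [tailC, incrB]
  | @cons c x cs xs hcx htl ih =>
    simp only [tailC, incrB]
    cases hi : incrB cs xs with
    | some xs' =>
      rw [hi] at ih
      rw [ih]
      simp [tailC]
    | none =>
      rw [hi] at ih
      rw [ih]
      by_cases hxc : x = c
      · subst hxc
        simp [PySem.List.pyRange_one_eq_nil (by omega : x + 1 ≤ x + 1)]
      · simp only [if_neg hxc, tailC, List.map_cons, List.map_nil]
        rw [tail_zeros (valid_nonneg htl)]
        rw [PySem.List.pyRange_one_cons (by omega : x + 1 < c + 1)]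
        simp [List.flatMap_cons]

theorem loop_flat {chips : List Int} (fuel : Nat) :
    ∀ cur flat, validC chips cur → (tailC chips cur).length ≤ fuel →
    loopB chips fuel cur flat = flat ++ ((tailC chips cur).filter okC).flatten := by
  induction fuel with
  | zero =>
    intro cur flat hv hlen
    rw [tail_step hv] at hlen
    simp at hlen
  | succ f ih =>
    intro cur flat hv hlen
    rw [tail_step hv] at hlen ⊢
    simp only [loopB]
    cases hi : incrB chips cur with
    | none =>
      simp only [hi] at hlen ⊢
      by_cases hok : cur ≠ [0, 0, 0, 0] ∧ cur ≠ [1, 1, 1, 1]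
      · have : okC cur = true := by simp [okC]; tauto
        simp [hok, this]
      · have : okC cur = false := by simp [okC]; tauto
        simp [if_neg hok, this]
    | some cur' =>
      simp only [hi] at hlen ⊢
      have hv' := incr_valid hv hi
      rw [ih cur' _ hv' (by simpa using hlen)]
      by_cases hok : cur ≠ [0, 0, 0, 0] ∧ cur ≠ [1, 1, 1, 1]
      · have : okC cur = true := by simp [okC]; tauto
        simp [hok, this]
      · have : okC cur = false := by simp [okC]; tauto
        simp [if_neg hok, this]

theorem len_combos (chips : List Int) :
    (combos chips).length = (chips.map (fun c => (c + 1).toNat)).prod := by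
  induction chips with
  | nil => simp [combos]
  | cons c cs ih =>
    simp only [combos, List.length_flatMap, List.map_cons, List.prod_cons]
    simp only [List.length_map]
    rw [List.map_const', List.sum_replicate, smul_eq_mul]
    rw [PySem.List.length_pyRange_one, ih]
    norm_num

theorem flat_dist (L : List Int) (f : Int → List (List Int)) (g : List Int → List Int) :
    (((L.flatMap f).map g).filter okC).flatten
      = L.flatMap (fun x => (((f x).map g).filter okC).flatten) := by
  induction L with
  | nil => simp
  | cons a L ih => simp [List.flatMap_cons, List.filter_append, ih]

-- characterisation of A's generator: flatten of the ok-filtered prefixed combinations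
theorem genA_eq (chips : List Int) : ∀ idx choice,
    genA chips idx choice
      = (((combos (chips.drop idx)).map (choice ++ ·)).filter okC).flatten := by
  suffices h : ∀ n idx choice, chips.length - idx = n →
      genA chips idx choice
        = (((combos (chips.drop idx)).map (choice ++ ·)).filter okC).flatten by
    intro idx choice; exact h _ idx choice rfl
  intro n
  induction n with
  | zero =>
    intro idx choice hn
    have hge : idx ≥ chips.length := by omega
    rw [genA, if_pos hge, List.drop_eq_nil_of_le hge]
    simp only [combos, List.map_cons, List.map_nil, List.append_nil]
    by_cases hb : choice = [0, 0, 0, 0] ∨ choice = [1, 1, 1, 1]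
    · have : okC choice = false := by simp [okC]; tauto
      simp [hb, this]
    · have : okC choice = true := by simp [okC]; tauto
      simp [hb, this]
  | succ n ih =>
    intro idx choice hn
    have hlt : idx < chips.length := by omega
    rw [genA, if_neg (by omega)]
    rw [PySem.List.foldl_append_eq_flatMap]
    rw [List.drop_eq_getElem_cons hlt]
    simp only [combos]
    rw [flat_dist]
    rw [List.getD_eq_getElem chips 0 hlt]
    simp only [List.nil_append]
    apply List.flatMap_congr
    intro x hx
    rw [ih (idx + 1) (choice ++ [x]) (by omega)]
    rw [List.map_map]
    congr 2
    apply List.map_congr_left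
    intro t ht
    simp

theorem main_eq (chips : List Int) : generate_choices chips = generate_choices_alt chips := by
  by_cases hneg : chips.any (fun c => decide (c < 0)) = true
  · have hA : genA chips 0 [] = [] := by
      rw [genA_eq chips 0 []]
      rw [List.drop_zero, combos_neg (by simpa using hneg)]
      simp
    simp only [generate_choices, generate_choices_alt, if_pos hneg]
    rw [hA]
    decide
  · have hpos : ∀ c ∈ chips, 0 ≤ c := by
      intro c hc
      simp only [List.any_eq_true, decide_eq_true_eq] at hneg
      push Not at hneg
      exact hneg c hc
    have hflat : genA chips 0 []
        = loopB chips ((chips.map (fun c => (c + 1).toNat)).prod) (zerosB chips) [] := by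
      rw [genA_eq chips 0 [], List.drop_zero]
      rw [loop_flat _ _ _ (valid_zeros hpos)
        (by rw [tail_zeros hpos, len_combos])]
      rw [tail_zeros hpos]
      simp
    simp only [generate_choices, generate_choices_alt, if_neg hneg]
    rw [hflat]

-- ===== VERDICT (by name: the statement is the Claim_ definition above) =====
theorem generate_choices_spec : Claim_equal_generate_choices := by
  intro chips _
  unfold Spec_generate_choices
  exact main_eq chips
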